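-- pv_equiv track=rewrite | github.com/t-espy/lean-optimizer-public | main.py | _apply_symbol_filter
-- ===== SOURCE A (Python) =====
-- def _apply_symbol_filter(
--     param_sets: list[dict],
--     symbol: str,
--     override_symbol: bool,
-- ) -> list[dict]:
--     filtered: list[dict] = []
--     for params in param_sets:
--         p = dict(params)
--         if "ticker" in p:
--             if override_symbol:
--                 p["ticker"] = symbol
--             elif p["ticker"] != symbol:
--                 continue
--         else:
--             p["ticker"] = symbol
--         filtered.append(p)
--     return filtered
-- ===== SOURCE B (Python) =====
-- def _apply_symbol_filter(
--     param_sets: list[dict],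
--     symbol: str,
--     override_symbol: bool,
-- ) -> list[dict]:
--     # Stage 1: decide the kept sets up front.  With override_symbol everything is
--     # kept, so that branch is hoisted out of any per-item test; otherwise a set is
--     # kept iff params.get("ticker", symbol) == symbol (the missing-key case folds
--     # into the equality via the default).
--     if override_symbol:
--         kept = param_sets
--     else:
--         kept = [p for p in param_sets if p.get("ticker", symbol) == symbol]
--     # Stage 2: rebuild each kept set with ticker stamped to symbol.
--     return [{**p, "ticker": symbol} for p in kept]
-- ===== Notes on version B (the rewrite author's own statement) =====
-- stated objective: simpler
-- what changed: Replaces A's single pass with a three-way branch-and-continue by two staged passes with the override branch hoisted out of the loop: a selection stage whose whole keep test is params.get('ticker', symbol) == symbol (folding the missing-key case into the default), skipped entirely when override_symbol, then a uniform rebuild stage {**p, 'ticker': symbol}.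
import Mathlib
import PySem

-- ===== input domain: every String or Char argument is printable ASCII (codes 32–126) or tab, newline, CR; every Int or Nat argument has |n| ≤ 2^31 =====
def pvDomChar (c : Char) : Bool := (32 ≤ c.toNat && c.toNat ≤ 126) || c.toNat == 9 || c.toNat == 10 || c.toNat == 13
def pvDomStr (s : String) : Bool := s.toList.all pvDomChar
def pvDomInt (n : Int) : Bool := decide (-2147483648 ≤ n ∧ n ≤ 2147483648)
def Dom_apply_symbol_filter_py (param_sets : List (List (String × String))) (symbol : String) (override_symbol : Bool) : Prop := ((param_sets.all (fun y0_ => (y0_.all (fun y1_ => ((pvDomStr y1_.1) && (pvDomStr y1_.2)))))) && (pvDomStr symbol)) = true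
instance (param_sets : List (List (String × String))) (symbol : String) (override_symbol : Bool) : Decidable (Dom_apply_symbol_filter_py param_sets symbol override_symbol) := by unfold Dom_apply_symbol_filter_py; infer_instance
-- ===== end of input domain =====

-- B replaces A's single-pass three-way branch-and-continue by two staged passes with the
-- override branch hoisted out of the loop: select via get("ticker", symbol) == symbol, then
-- uniformly stamp ticker := symbol (simpler decomposition; same complexity).


-- ===== PORT A =====
-- literal port of A's loop: copy the dict, three-way branch (override / equality test with
-- continue / missing-key insert), append the kept copy.  p["ticker"] is read under the
-- 'contains' guard, so getD with a dummy default is exact there.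
def apply_symbol_filter_py (param_sets : List (List (String × String))) (symbol : String) (override_symbol : Bool) : List (List (String × String)) :=
  param_sets.foldl
    (fun filtered params =>
      let p := PySem.Dict.ofList params
      if p.contains "ticker" then
        if override_symbol then
          filtered ++ [(p.insert "ticker" symbol).items]
        else if p.getD "ticker" "" != symbol then
          filtered
        else
          filtered ++ [p.items]
      else
        filtered ++ [(p.insert "ticker" symbol).items])
    []

-- ===== PORT B =====
-- port of Source B: stage 1 picks 'kept' (all of them under override, else the
-- get-with-default equality filter), stage 2 maps the uniform rebuild over 'kept'.
def apply_symbol_filter_py_alt (param_sets : List (List (String × String))) (symbol : String) (override_symbol : Bool) : List (List (String × String)) :=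
  let kept :=
    if override_symbol then param_sets
    else param_sets.filter (fun p => (PySem.Dict.ofList p).getD "ticker" symbol == symbol)
  kept.map (fun p => ((PySem.Dict.ofList p).insert "ticker" symbol).items)

-- ===== PRECONDITION & SPEC =====
def Spec_apply_symbol_filter_py (param_sets : List (List (String × String))) (symbol : String) (override_symbol : Bool) (out : List (List (String × String))) : Prop := out = apply_symbol_filter_py_alt param_sets symbol override_symbol
instance (param_sets : List (List (String × String))) (symbol : String) (override_symbol : Bool) (out : List (List (String × String))) : Decidable (Spec_apply_symbol_filter_py param_sets symbol override_symbol out) := by unfold Spec_apply_symbol_filter_py; infer_instance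

-- ===== CLAIM (what is proved, stated in full; the proofs are below) =====
def Claim_equal_apply_symbol_filter_py : Prop := ∀ (param_sets : List (List (String × String))) (symbol : String) (override_symbol : Bool), Dom_apply_symbol_filter_py param_sets symbol override_symbol → Spec_apply_symbol_filter_py param_sets symbol override_symbol (apply_symbol_filter_py param_sets symbol override_symbol)

-- ===== LEMMAS AND PROOFS =====

-- Inserting at a key that is present with the very value being inserted is a no-op on items.
theorem pv_insert_items_eq (d : PySem.Dict String String) (k v : String)
    (hc : d.contains k = true) (hnd : d.keys.Nodup) (hv : d.getD k "" = v) :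
    (d.insert k v).items = d.items := by
  rw [PySem.Dict.items_insert_of_contains d v hc]
  conv_rhs => rw [← List.map_id d.items]
  refine List.map_congr_left (fun p hp => ?_)
  by_cases hk : p.1 = k
  · have := PySem.Dict.getD_of_mem_items (d := d) (k := p.1) (v := p.2) (by simpa using hp) hnd ""
    simp [hk, ← hv, ← this, Prod.ext_iff]
  · simp [hk]

-- getD does not depend on the default when the key is present.
theorem pv_getD_indep (d : PySem.Dict String String) (k d1 d2 : String)
    (hc : d.contains k = true) : d.getD k d1 = d.getD k d2 := by
  rw [PySem.Dict.contains_eq_isSome_get?] at hc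
  obtain ⟨v, hv⟩ := Option.isSome_iff_exists.mp hc
  rw [PySem.Dict.getD_eq_get?_getD, PySem.Dict.getD_eq_get?_getD, hv]
  rfl

-- B's result unfolds element by element: the head contributes its rebuilt copy iff
-- override or its (defaulted) ticker equals symbol.
theorem pv_alt_cons (p : List (String × String)) (rest : List (List (String × String)))
    (symbol : String) (override_symbol : Bool) :
    apply_symbol_filter_py_alt (p :: rest) symbol override_symbol
    = (if override_symbol || ((PySem.Dict.ofList p).getD "ticker" symbol == symbol)
        then [((PySem.Dict.ofList p).insert "ticker" symbol).items] else [])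
      ++ apply_symbol_filter_py_alt rest symbol override_symbol := by
  cases override_symbol with
  | false =>
    by_cases h : (PySem.Dict.ofList p).getD "ticker" symbol = symbol <;>
      simp [apply_symbol_filter_py_alt, h]
  | true => simp [apply_symbol_filter_py_alt]

-- the loop with any accumulator equals acc ++ (B's staged result)
theorem pv_foldl_eq (symbol : String) (override_symbol : Bool) :
    ∀ (ps : List (List (String × String))) (acc : List (List (String × String))),
    ps.foldl
      (fun filtered params =>
        let p := PySem.Dict.ofList params
        if p.contains "ticker" then
          if override_symbol then
            filtered ++ [(p.insert "ticker" symbol).items]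
          else if p.getD "ticker" "" != symbol then
            filtered
          else
            filtered ++ [p.items]
        else
          filtered ++ [(p.insert "ticker" symbol).items])
      acc
    = acc ++ apply_symbol_filter_py_alt ps symbol override_symbol := by
  intro ps
  induction ps with
  | nil => intro acc; simp [apply_symbol_filter_py_alt]
  | cons params rest ih =>
    intro acc
    rw [List.foldl_cons, pv_alt_cons]
    show List.foldl _
        (let p := PySem.Dict.ofList params
         if p.contains "ticker" then
           if override_symbol then
             acc ++ [(p.insert "ticker" symbol).items]
           else if p.getD "ticker" "" != symbol then
             acc
           else
             acc ++ [p.items]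
         else
           acc ++ [(p.insert "ticker" symbol).items]) rest = _
    simp only []
    set d := PySem.Dict.ofList params with hd
    by_cases hc : d.contains "ticker" = true
    · by_cases hov : override_symbol = true
      · rw [if_pos hc, if_pos hov, ih]
        simp [hov, List.append_assoc]
      · have hdef : d.getD "ticker" "" = d.getD "ticker" symbol := pv_getD_indep d _ _ _ hc
        by_cases heq : d.getD "ticker" "" = symbol
        · have hitems : (d.insert "ticker" symbol).items = d.items :=
            pv_insert_items_eq d _ _ hc (by rw [hd]; exact PySem.Dict.nodup_keys_ofList params) heq
          have hne : ¬ ((d.getD "ticker" "" != symbol) = true) := by simp [heq]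
          rw [if_pos hc, if_neg hov, if_neg hne, ih]
          have hk : (override_symbol || (d.getD "ticker" symbol == symbol)) = true := by
            simp [← hdef, heq]
          simp [hk, hitems, List.append_assoc]
        · have hbn : (d.getD "ticker" "" != symbol) = true := by simp [bne_iff_ne, heq]
          rw [if_pos hc, if_neg hov, if_pos hbn, ih]
          have hov' : override_symbol = false := by simpa using hov
          have hk : (override_symbol || (d.getD "ticker" symbol == symbol)) = false := by
            simp [hov', ← hdef, heq]
          simp [hk]
    · rw [if_neg hc, ih]
      have hk : (override_symbol || (d.getD "ticker" symbol == symbol)) = true := by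
        have h0 : d.contains "ticker" = false := by simpa using hc
        simp [PySem.Dict.getD_of_not_contains d symbol h0]
      simp [hk, List.append_assoc]

-- ===== VERDICT (by name: the statement is the Claim_ definition above) =====
theorem apply_symbol_filter_py_spec : Claim_equal_apply_symbol_filter_py := by
  intro param_sets symbol override_symbol _
  show apply_symbol_filter_py param_sets symbol override_symbol = _
  rw [apply_symbol_filter_py, pv_foldl_eq]
  simp
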